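-- pv_equiv track=rewrite | github.com/akatsuyama/LigX | LigX/LigX_core.py | get_initial_x
-- ===== SOURCE A (Python) =====
-- def get_initial_x(initial_remaining_data):
--     first_column= [item[0] for item in initial_remaining_data if len(item) > 0]
--     for x in ['XC3_2','XC3g_2','XC2_2','XC1_2','XCA_2']:
--         if any(x in element for element in first_column):
--             transform_log_main = ['',x]
--             transform_log_side = ['',x]
--             c_for_next = [x]
--             param_for_next = []
--             ref_frag_list_next = []
--             return transform_log_main,transform_log_side,c_for_next,param_for_next,ref_frag_list_next
--     if any('X4' in element for element in first_column):
--         transform_log_main = ['','XCA_1']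
--         transform_log_side = ['','XCA_1']
--         c_for_next = ['XCA_1']
--         param_for_next = []
--         ref_frag_list_next = []
--         return transform_log_main,transform_log_side,c_for_next,param_for_next,ref_frag_list_next
--     if any('XC5' in element for element in first_column):
--         transform_log_main = ['','XCA_1']
--         transform_log_side = ['','XCA_1']
--         c_for_next = ['XCA_1']
--         param_for_next = []
--         ref_frag_list_next = []
--         return transform_log_main,transform_log_side,c_for_next,param_for_next,ref_frag_list_next
--     if any('YCA' in element for element in first_column):
--         transform_log_main = ['XCA_1','YCA']
--         transform_log_side = ['XCA_1','YCA']
--         c_for_next = []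
--         param_for_next = ['YCA']
--         if any('CX_0' in element for element in first_column):
--             ref_frag_list_next = ['CX_0']
--         elif any('NX_0' in element for element in first_column):
--             ref_frag_list_next = ['NX_0']
--         return transform_log_main,transform_log_side,c_for_next,param_for_next,ref_frag_list_next
--     if any('YO' in element for element in first_column):
--         transform_log_main = ['XC3_1','YO']
--         transform_log_side = ['XC3_1','YO']
--         c_for_next = []
--         param_for_next = ['YO']
--         if any('CX_0' in element for element in first_column):
--             ref_frag_list_next = ['CX_0']
--         elif any('NX_0' in element for element in first_column):
--             ref_frag_list_next = ['NX_0']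
--         return transform_log_main,transform_log_side,c_for_next,param_for_next,ref_frag_list_next
--     if any('YS' in element for element in first_column):
--         transform_log_main = ['XC3_1','YS']
--         transform_log_side = ['XC3_1','YS']
--         c_for_next = []
--         param_for_next = ['YS']
--         ref_frag_list_next = ['CX_0']
--         return transform_log_main,transform_log_side,c_for_next,param_for_next,ref_frag_list_next
--     if any('YSA' in element for element in first_column):
--         transform_log_main = ['XC3_1','YSA']
--         transform_log_side = ['XC3_1','YSA']
--         c_for_next = []
--         param_for_next = ['YSA']
--         ref_frag_list_next = ['YN3']
--         return transform_log_main,transform_log_side,c_for_next,param_for_next,ref_frag_list_next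
--     if any('YNA' in element for element in first_column):
--         transform_log_main = ['XCA_1','YNA']
--         transform_log_side = ['XCA_1','YNA']
--         c_for_next = []
--         param_for_next = ['YNA']
--         ref_frag_list_next = ['CX_0']
--         return transform_log_main,transform_log_side,c_for_next,param_for_next,ref_frag_list_next
--     if any('YN2' in element for element in first_column):
--         transform_log_main = ['XCA_1','YN2']
--         transform_log_side = ['XCA_1','YN2']
--         c_for_next = []
--         param_for_next = ['YN2']
--         if any('CX_0' in element for element in first_column):
--             ref_frag_list_next = ['CX_0']
--         elif any('NX_0' in element for element in first_column):
--             ref_frag_list_next = ['NX_0']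
--         return transform_log_main,transform_log_side,c_for_next,param_for_next,ref_frag_list_next
--     if any('YN3' in element for element in first_column):
--         transform_log_main = ['XC3_1','YN3']
--         transform_log_side = ['XC3_1','YN3']
--         c_for_next = []
--         param_for_next = ['YN3']
--         if any('CX_0' in element for element in first_column):
--             ref_frag_list_next = ['CX_0']
--         elif any('NX_0' in element for element in first_column):
--             ref_frag_list_next = ['NX_0']
--         return transform_log_main,transform_log_side,c_for_next,param_for_next,ref_frag_list_next
-- ===== SOURCE B (Python) =====
-- PATTERNS = ('XC3_2', 'XC3g_2', 'XC2_2', 'XC1_2', 'XCA_2', 'X4', 'XC5', 'YCA',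
--             'YO', 'YS', 'YSA', 'YNA', 'YN2', 'YN3', 'CX_0', 'NX_0')
--
-- def get_initial_x(initial_remaining_data):
--     # One pass over the data: record which patterns occur as substrings.
--     present = set()
--     for item in initial_remaining_data:
--         if item:
--             e = item[0]
--             for p in PATTERNS:
--                 if p not in present and p in e:
--                     present.add(p)
--     for x in ('XC3_2', 'XC3g_2', 'XC2_2', 'XC1_2', 'XCA_2'):
--         if x in present:
--             return ['', x], ['', x], [x], [], []
--     if 'X4' in present or 'XC5' in present:
--         return ['', 'XCA_1'], ['', 'XCA_1'], ['XCA_1'], [], []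
--     ref = ['CX_0'] if 'CX_0' in present else (['NX_0'] if 'NX_0' in present else [])
--     TABLE = (('YCA', 'XCA_1', None), ('YO', 'XC3_1', None), ('YS', 'XC3_1', ['CX_0']),
--              ('YSA', 'XC3_1', ['YN3']), ('YNA', 'XCA_1', ['CX_0']),
--              ('YN2', 'XCA_1', None), ('YN3', 'XC3_1', None))
--     for y, pref, fixed in TABLE:
--         if y in present:
--             return [pref, y], [pref, y], [], [y], (ref if fixed is None else fixed)
--     return None
-- ===== Notes on version B (the rewrite author's own statement) =====
-- stated objective: alternative
-- what changed: A rescans the whole first column once per pattern (up to 16 any()-scans plus rebuilding the column); B makes a single pass over the data recording which of the 16 patterns occur as substrings in a set, then dispatches through a flat priority table that only reads the set.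
-- outside the precondition, e.g. on get_initial_x([['zzz']]): A returns None, B returns None
-- crash fix: A raises UnboundLocalError when the first matching pattern is YCA, YO, YN2 or YN3 but no element contains CX_0 or NX_0 (ref_frag_list_next is never assigned); B returns the same tuple with an empty ref_frag_list_next there. — e.g. on get_initial_x([["YCA"]]): A raises UnboundLocalError, B returns (["XCA_1", "YCA"], ["XCA_1", "YCA"], [], ["YCA"], [])
import Mathlib
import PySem

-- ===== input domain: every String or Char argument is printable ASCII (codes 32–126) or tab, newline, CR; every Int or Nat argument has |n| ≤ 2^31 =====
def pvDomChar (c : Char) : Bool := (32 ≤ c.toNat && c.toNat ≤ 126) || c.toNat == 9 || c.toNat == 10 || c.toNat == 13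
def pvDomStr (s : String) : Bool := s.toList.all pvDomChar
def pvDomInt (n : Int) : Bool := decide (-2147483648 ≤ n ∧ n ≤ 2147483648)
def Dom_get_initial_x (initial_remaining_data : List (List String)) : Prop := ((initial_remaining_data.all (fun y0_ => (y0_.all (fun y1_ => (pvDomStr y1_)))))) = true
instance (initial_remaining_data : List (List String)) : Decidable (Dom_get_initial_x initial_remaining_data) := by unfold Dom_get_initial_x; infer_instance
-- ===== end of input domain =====

-- B replaces A's 16 repeated any()-scans of the first column by one pass that records
-- which patterns occur, followed by a flat priority-table dispatch (objective: alternative).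

-- ===== PORT A =====
-- first_column = [item[0] for item in initial_remaining_data if len(item) > 0]
def firstColumnA (initial_remaining_data : List (List String)) : List String :=
  initial_remaining_data.filterMap List.head?

-- any(x in element for element in first_column)
def anyInA (fc : List String) (x : String) : Bool :=
  fc.any (fun e => PySem.Str.isIn x e)

-- the for-loop over ['XC3_2','XC3g_2','XC2_2','XC1_2','XCA_2']; k = the code after the
-- loop (reached when no pattern of the list matched, i.e. the loop falls through)
def loopA (fc : List String)
    (k : List String × List String × List String × List String × List String) :
    List String → List String × List String × List String × List String × List String
  | [] => k
  | x :: rest =>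
    if anyInA fc x then (["", x], ["", x], [x], ([] : List String), ([] : List String))
    else loopA fc k rest

-- Where Python raises UnboundLocalError (ref_frag_list_next never assigned) or falls
-- through returning None, the port returns a default ([] resp. all-empty tuple); both
-- cases are excluded by Pre_get_initial_x.
def get_initial_x (initial_remaining_data : List (List String)) :
    List String × List String × List String × List String × List String :=
  let fc := firstColumnA initial_remaining_data
  loopA fc
    (if anyInA fc "X4" then (["", "XCA_1"], ["", "XCA_1"], ["XCA_1"], [], [])
    else if anyInA fc "XC5" then (["", "XCA_1"], ["", "XCA_1"], ["XCA_1"], [], [])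
    else if anyInA fc "YCA" then
      (["XCA_1", "YCA"], ["XCA_1", "YCA"], [], ["YCA"],
        if anyInA fc "CX_0" then ["CX_0"] else if anyInA fc "NX_0" then ["NX_0"] else [])
    else if anyInA fc "YO" then
      (["XC3_1", "YO"], ["XC3_1", "YO"], [], ["YO"],
        if anyInA fc "CX_0" then ["CX_0"] else if anyInA fc "NX_0" then ["NX_0"] else [])
    else if anyInA fc "YS" then (["XC3_1", "YS"], ["XC3_1", "YS"], [], ["YS"], ["CX_0"])
    else if anyInA fc "YSA" then (["XC3_1", "YSA"], ["XC3_1", "YSA"], [], ["YSA"], ["YN3"])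
    else if anyInA fc "YNA" then (["XCA_1", "YNA"], ["XCA_1", "YNA"], [], ["YNA"], ["CX_0"])
    else if anyInA fc "YN2" then
      (["XCA_1", "YN2"], ["XCA_1", "YN2"], [], ["YN2"],
        if anyInA fc "CX_0" then ["CX_0"] else if anyInA fc "NX_0" then ["NX_0"] else [])
    else if anyInA fc "YN3" then
      (["XC3_1", "YN3"], ["XC3_1", "YN3"], [], ["YN3"],
        if anyInA fc "CX_0" then ["CX_0"] else if anyInA fc "NX_0" then ["NX_0"] else [])
    else ([], [], [], [], []))
    ["XC3_2", "XC3g_2", "XC2_2", "XC1_2", "XCA_2"]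

-- ===== PORT B =====
def patternsB : List String :=
  ["XC3_2", "XC3g_2", "XC2_2", "XC1_2", "XCA_2", "X4", "XC5", "YCA",
   "YO", "YS", "YSA", "YNA", "YN2", "YN3", "CX_0", "NX_0"]

-- inner loop: for p in PATTERNS: if p not in present and p in e: present.add(p)
def addPats (pr : PySem.Set String) (e : String) : PySem.Set String :=
  patternsB.foldl (fun pr p => if !pr.contains p && PySem.Str.isIn p e then pr.add p else pr) pr

-- one pass over the data
def presentOf (initial_remaining_data : List (List String)) : PySem.Set String :=
  initial_remaining_data.foldl
    (fun pr item => match item with | [] => pr | e :: _ => addPats pr e) PySem.Set.empty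

-- the first dispatch loop; k = the code after it (reached on fall-through)
def loopB1 (present : PySem.Set String)
    (k : List String × List String × List String × List String × List String) :
    List String → List String × List String × List String × List String × List String
  | [] => k
  | x :: rest =>
    if present.contains x then (["", x], ["", x], [x], ([] : List String), ([] : List String))
    else loopB1 present k rest

def tableB : List (String × String × Option (List String)) :=
  [("YCA", "XCA_1", none), ("YO", "XC3_1", none), ("YS", "XC3_1", some ["CX_0"]),
   ("YSA", "XC3_1", some ["YN3"]), ("YNA", "XCA_1", some ["CX_0"]),
   ("YN2", "XCA_1", none), ("YN3", "XC3_1", none)]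

-- the table dispatch loop; Source B's trailing 'return None' is unreachable inside Pre_,
-- the port defaults to the all-empty tuple there
def loopB2 (present : PySem.Set String) (ref : List String) :
    List (String × String × Option (List String)) →
      List String × List String × List String × List String × List String
  | [] => ([], [], [], [], [])
  | (y, pref, fixed) :: rest =>
    if present.contains y then ([pref, y], [pref, y], [], [y], fixed.getD ref)
    else loopB2 present ref rest

def get_initial_x_alt (initial_remaining_data : List (List String)) :
    List String × List String × List String × List String × List String :=
  let present := presentOf initial_remaining_data
  loopB1 present
    (if present.contains "X4" || present.contains "XC5" then
      (["", "XCA_1"], ["", "XCA_1"], ["XCA_1"], [], [])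
    else
      loopB2 present
        (if present.contains "CX_0" then ["CX_0"]
         else if present.contains "NX_0" then ["NX_0"] else [])
        tableB)
    ["XC3_2", "XC3g_2", "XC2_2", "XC1_2", "XCA_2"]

-- ===== PRECONDITION & SPEC =====
-- helper for the precondition: some non-empty row's first entry contains p
def pvHas (initial_remaining_data : List (List String)) (p : String) : Bool :=
  initial_remaining_data.any
    (fun item => match item with | [] => false | e :: _ => PySem.Str.isIn p e)

-- the precondition / raises region as boolean formulas over the 16 pattern presences
def preBools (xc32 xc3g2 xc22 xc12 xca2 x4 xc5 yca yo ys ysa yna yn2 yn3 cx nx : Bool) : Bool :=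
  let g1 := xc32 || xc3g2 || xc22 || xc12 || xca2 || x4 || xc5
  let cxx := cx || nx
  (g1 || yca || yo || ys || ysa || yna || yn2 || yn3)
   && (g1 || !yca || cxx)
   && (g1 || yca || !yo || cxx)
   && (g1 || yca || yo || ys || ysa || yna || !yn2 || cxx)
   && (g1 || yca || yo || ys || ysa || yna || yn2 || !yn3 || cxx)

def raisesBools (xc32 xc3g2 xc22 xc12 xca2 x4 xc5 yca yo ys ysa yna yn2 yn3 cx nx : Bool) : Bool :=
  let g1 := xc32 || xc3g2 || xc22 || xc12 || xca2 || x4 || xc5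
  let cxx := cx || nx
  !g1 && !cxx
   && (yca || (!yca && yo) || (!yca && !yo && !ys && !ysa && !yna && yn2)
       || (!yca && !yo && !ys && !ysa && !yna && !yn2 && yn3))

-- Pre_ excludes exactly the inputs where Python A does not return a tuple: when no
-- pattern occurs anywhere A falls off the end returning None (not a value of the
-- declared type), and when the first matching pattern is YCA/YO/YN2/YN3 with neither
-- CX_0 nor NX_0 present A raises UnboundLocalError.
def Pre_get_initial_x (initial_remaining_data : List (List String)) : Prop :=
  let h := pvHas initial_remaining_data
  preBools (h "XC3_2") (h "XC3g_2") (h "XC2_2") (h "XC1_2") (h "XCA_2") (h "X4") (h "XC5")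
    (h "YCA") (h "YO") (h "YS") (h "YSA") (h "YNA") (h "YN2") (h "YN3")
    (h "CX_0") (h "NX_0") = true
instance (initial_remaining_data : List (List String)) : Decidable (Pre_get_initial_x initial_remaining_data) := by unfold Pre_get_initial_x; infer_instance

def pvWitness_get_initial_x : List (List String) := [["XC3_2"]]

-- A raises UnboundLocalError when the first matching pattern is YCA, YO, YN2 or YN3 but
-- no first-column element contains CX_0 or NX_0; B returns the tuple with empty ref list.
def Raises_get_initial_x (initial_remaining_data : List (List String)) : Prop :=
  let h := pvHas initial_remaining_data
  raisesBools (h "XC3_2") (h "XC3g_2") (h "XC2_2") (h "XC1_2") (h "XCA_2") (h "X4") (h "XC5")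
    (h "YCA") (h "YO") (h "YS") (h "YSA") (h "YNA") (h "YN2") (h "YN3")
    (h "CX_0") (h "NX_0") = true
instance (initial_remaining_data : List (List String)) : Decidable (Raises_get_initial_x initial_remaining_data) := by unfold Raises_get_initial_x; infer_instance

def pvRaiseWitness_get_initial_x : List (List String) := [["YCA"]]
def pvRaiseWitnessOut_get_initial_x : List String × List String × List String × List String × List String :=
  (["XCA_1", "YCA"], ["XCA_1", "YCA"], [], ["YCA"], [])

def Spec_get_initial_x (initial_remaining_data : List (List String)) (out : List String × List String × List String × List String × List String) : Prop := out = get_initial_x_alt initial_remaining_data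
instance (initial_remaining_data : List (List String)) (out : List String × List String × List String × List String × List String) : Decidable (Spec_get_initial_x initial_remaining_data out) := by unfold Spec_get_initial_x; infer_instance

-- ===== CLAIM (what is proved, stated in full; the proofs are below) =====
def Claim_equal_get_initial_x : Prop := ∀ (initial_remaining_data : List (List String)), Dom_get_initial_x initial_remaining_data → Pre_get_initial_x initial_remaining_data → Spec_get_initial_x initial_remaining_data (get_initial_x initial_remaining_data)

def Claim_raises_get_initial_x : Prop := (∀ (initial_remaining_data : List (List String)), Dom_get_initial_x initial_remaining_data → Raises_get_initial_x initial_remaining_data → ¬ Pre_get_initial_x initial_remaining_data) ∧ (Dom_get_initial_x (pvRaiseWitness_get_initial_x) ∧ Raises_get_initial_x (pvRaiseWitness_get_initial_x) ∧ get_initial_x_alt (pvRaiseWitness_get_initial_x) = pvRaiseWitnessOut_get_initial_x)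

-- ===== LEMMAS AND PROOFS =====

-- A's any()-scan over the first column equals pvHas
theorem anyInA_eq_pvHas (data : List (List String)) (p : String) :
    anyInA (firstColumnA data) p = pvHas data p := by
  induction data with
  | nil => rfl
  | cons item rest ih =>
    cases item with
    | nil => simpa [firstColumnA, anyInA, pvHas] using ih
    | cons e t =>
      simp [firstColumnA, anyInA, pvHas] at ih ⊢
      rw [ih]

-- membership after the inner pattern loop
theorem contains_addPats_step (pr : PySem.Set String) (e p q : String) :
    (if !pr.contains q && PySem.Str.isIn q e then pr.add q else pr).contains p
      = (pr.contains p || (decide (p = q) && PySem.Str.isIn p e)) := by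
  by_cases hpq : p = q
  · subst hpq
    by_cases hc : p ∈ pr
    · simp [hc]
    · by_cases hi : PySem.Chars.isIn p.toList e.toList
      · simp [hc, hi]
      · simp [hc, hi]
  · by_cases hc : p ∈ pr <;>
      simp only [hpq, decide_false, Bool.false_and, Bool.or_false] <;>
      split <;> simp [PySem.Set.mem_add, hc, hpq]

theorem contains_addPats_aux (e : String) (p : String) :
    ∀ (L : List String) (pr : PySem.Set String),
      ((L.foldl (fun pr p => if !pr.contains p && PySem.Str.isIn p e then pr.add p else pr) pr).contains p)
        = (pr.contains p || (decide (p ∈ L) && PySem.Str.isIn p e)) := by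
  intro L
  induction L with
  | nil => intro pr; simp
  | cons q rest ih =>
    intro pr
    rw [List.foldl_cons, ih, contains_addPats_step]
    by_cases hpq : p = q
    · subst hpq
      cases hb : PySem.Chars.isIn p.toList e.toList <;>
        by_cases hm : p ∈ rest <;> simp [hm, hb]
    · simp [hpq]

theorem contains_addPats (pr : PySem.Set String) (e p : String) :
    (addPats pr e).contains p = (pr.contains p || (decide (p ∈ patternsB) && PySem.Str.isIn p e)) := by
  simpa [addPats] using contains_addPats_aux e p patternsB pr

-- membership in the set built by B's single pass equals pvHas, for listed patterns
theorem contains_presentOf (data : List (List String)) (p : String) (hp : p ∈ patternsB) :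
    (presentOf data).contains p = pvHas data p := by
  suffices h : ∀ pr : PySem.Set String,
      ((data.foldl (fun pr item => match item with | [] => pr | e :: _ => addPats pr e) pr).contains p)
        = (pr.contains p || pvHas data p) by
    simpa [presentOf] using h PySem.Set.empty
  induction data with
  | nil => intro pr; simp [pvHas]
  | cons item rest ih =>
    intro pr
    cases item with
    | nil => simp only [List.foldl_cons, ih]; simp [pvHas]
    | cons e t =>
      simp only [List.foldl_cons, ih, contains_addPats, hp]
      simp [pvHas, Bool.or_assoc]

-- ===== VERDICT (by name: the statement is the Claim_ definition above) =====
-- merging A's two identical X4/XC5 branches into one disjunction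
theorem if_or_branch {R : Type} (a b : Bool) (r c : R) :
    (if (a || b) = true then r else c) = if a = true then r else if b = true then r else c := by
  cases a <;> cases b <;> rfl

-- ===== VERDICT (by name: the statement is the Claim_ definition above) =====
set_option maxHeartbeats 1000000 in
theorem get_initial_x_spec : Claim_equal_get_initial_x := by
  intro data _ _
  unfold Spec_get_initial_x get_initial_x get_initial_x_alt
  simp only [loopA, loopB1, loopB2, tableB, Option.getD,
    anyInA_eq_pvHas,
    contains_presentOf data "XC3_2" (by decide),
    contains_presentOf data "XC3g_2" (by decide),
    contains_presentOf data "XC2_2" (by decide),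
    contains_presentOf data "XC1_2" (by decide),
    contains_presentOf data "XCA_2" (by decide),
    contains_presentOf data "X4" (by decide),
    contains_presentOf data "XC5" (by decide),
    contains_presentOf data "YCA" (by decide),
    contains_presentOf data "YO" (by decide),
    contains_presentOf data "YS" (by decide),
    contains_presentOf data "YSA" (by decide),
    contains_presentOf data "YNA" (by decide),
    contains_presentOf data "YN2" (by decide),
    contains_presentOf data "YN3" (by decide),
    contains_presentOf data "CX_0" (by decide),
    contains_presentOf data "NX_0" (by decide)]
  rw [if_or_branch]

theorem preBools_raisesBools_incompat : ∀ a b c d e f g h i j k l m n o p : Bool,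
    raisesBools a b c d e f g h i j k l m n o p = true →
    ¬ preBools a b c d e f g h i j k l m n o p = true := by decide

@[simp]
theorem get_initial_x_raises : Claim_raises_get_initial_x := by
  unfold Claim_raises_get_initial_x
  refine ⟨?_, by decide, by decide, by decide⟩
  intro data _ hr hp
  exact preBools_raisesBools_incompat _ _ _ _ _ _ _ _ _ _ _ _ _ _ _ _ hr hp
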